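-- pv_equiv track=rewrite | github.com/iwaleedh/LearningAPP | fix_apostrophes.py | fix_primes_in_js
-- ===== SOURCE A (Python) =====
-- def fix_primes_in_js(content):
--     """
--     Walk through JS source character by character.
--     Inside single-quoted strings, escape apostrophes used as mathematical
--     prime/derivative notation — i.e., ' followed by space, =, +, /, ·, (, ).
--     """
--     result = []
--     i = 0
--     n = len(content)
--     # Characters that indicate a prime/derivative apostrophe (not string end)
--     prime_followers = set(' =+/*·,\t\n')
--
--     while i < n:
--         ch = content[i]
--
--         # Skip double-quoted strings
--         if ch == '"':
--             result.append(ch)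
--             i += 1
--             while i < n:
--                 c = content[i]
--                 result.append(c)
--                 if c == '\\':
--                     i += 1
--                     if i < n:
--                         result.append(content[i])
--                 elif c == '"':
--                     i += 1
--                     break
--                 i += 1
--             continue
--
--         # Handle single-quoted strings
--         if ch == "'":
--             result.append(ch)
--             i += 1
--             while i < n:
--                 c = content[i]
--                 if c == '\\':
--                     # Already escaped — keep as-is
--                     result.append(c)
--                     i += 1
--                     if i < n:
--                         result.append(content[i])
--                         i += 1
--                     continue
--                 if c == "'":
--                     # Peek at next char to decide: prime or end of string?
--                     next_ch = content[i+1] if i+1 < n else ''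
--                     if next_ch in prime_followers:
--                         # This looks like a prime notation — escape it
--                         result.append("\\'")
--                         i += 1
--                     else:
--                         # End of string
--                         result.append(c)
--                         i += 1
--                         break
--                     continue
--                 result.append(c)
--                 i += 1
--             continue
--
--         # Template literals - skip
--         if ch == '`':
--             result.append(ch)
--             i += 1
--             while i < n:
--                 c = content[i]
--                 result.append(c)
--                 if c == '\\':
--                     i += 1
--                     if i < n:
--                         result.append(content[i])
--                 elif c == '`':
--                     i += 1
--                     break
--                 i += 1
--             continue
--
--         # Line comments
--         if ch == '/' and i+1 < n and content[i+1] == '/':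
--             while i < n and content[i] != '\n':
--                 result.append(content[i])
--                 i += 1
--             continue
--
--         result.append(ch)
--         i += 1
--
--     return ''.join(result)
-- ===== SOURCE B (Python) =====
-- PRIME_FOLLOWERS = " =+/*\u00b7,\t\n"
--
-- def fix_primes_in_js(content):
--     # Flat single-pass state machine (NORMAL/DQ/SQ/TPL/COMMENT) with an escaped flag,
--     # instead of A's nested inner scanning loops.
--     NORMAL, DQ, SQ, TPL, COMMENT = range(5)
--     out = []
--     state = NORMAL
--     escaped = False
--     i = 0
--     n = len(content)
--     while i < n:
--         c = content[i]
--         if state == NORMAL: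
--             out.append(c)
--             if c == '"':
--                 state = DQ
--             elif c == "'":
--                 state = SQ
--             elif c == '`':
--                 state = TPL
--             elif c == '/' and i + 1 < n and content[i + 1] == '/':
--                 state = COMMENT
--         elif state == COMMENT:
--             out.append(c)
--             if c == '\n':
--                 state = NORMAL
--         elif state == SQ:
--             if escaped:
--                 out.append(c)
--                 escaped = False
--             elif c == '\\':
--                 out.append(c)
--                 escaped = True
--             elif c == "'":
--                 if i + 1 < n and content[i + 1] in PRIME_FOLLOWERS:
--                     out.append("\\'")       # prime notation: escape it
--                 else:
--                     out.append(c)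
--                     state = NORMAL          # end of string
--             else:
--                 out.append(c)
--         else:  # DQ or TPL: copy verbatim until the unescaped closer
--             closer = '"' if state == DQ else '`'
--             if escaped:
--                 out.append(c)
--                 escaped = False
--             elif c == '\\':
--                 out.append(c)
--                 escaped = True
--             elif c == closer:
--                 out.append(c)
--                 state = NORMAL
--             else:
--                 out.append(c)
--         i += 1
--     return ''.join(out)
-- ===== Notes on version B (the rewrite author's own statement) =====
-- stated objective: simpler
-- what changed: Replaced A's nested inner scanning loops (one while-loop per string/comment context inside the outer walk) by a single flat one-character-per-iteration state machine carrying an explicit state (NORMAL/DQ/SQ/TPL/COMMENT) and an escaped flag.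
import Mathlib
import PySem

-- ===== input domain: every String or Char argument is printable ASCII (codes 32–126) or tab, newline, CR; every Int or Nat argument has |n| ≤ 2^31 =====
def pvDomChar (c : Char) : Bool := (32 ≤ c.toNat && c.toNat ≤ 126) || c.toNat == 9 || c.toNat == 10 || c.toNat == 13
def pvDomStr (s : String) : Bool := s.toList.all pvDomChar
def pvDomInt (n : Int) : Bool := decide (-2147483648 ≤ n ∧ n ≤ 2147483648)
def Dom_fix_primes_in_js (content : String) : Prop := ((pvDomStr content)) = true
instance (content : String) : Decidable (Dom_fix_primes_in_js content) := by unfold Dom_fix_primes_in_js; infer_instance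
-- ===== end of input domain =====

-- B rewrites A's nested inner scanning loops as one flat state-machine pass (objective: simpler decomposition, same cost).

-- ===== PORT A =====
-- membership in A's set ' =+/*·,\t\n'
def pvPrimeFollower (c : Char) : Bool :=
  c = ' ' || c = '=' || c = '+' || c = '/' || c = '*' || c = '·' || c = ',' || c = '\t' || c = '\n'

-- A's inner double-quote loop: returns (appended chars, remaining input)
def pvADq : List Char → List Char × List Char
  | [] => ([], [])
  | c :: rest =>
    if c = '\\' then
      match rest with
      | [] => ([c], [])
      | d :: rest' => (c :: d :: (pvADq rest').1, (pvADq rest').2)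
    else if c = '"' then ([c], rest)
    else (c :: (pvADq rest).1, (pvADq rest).2)

-- A's inner backtick loop
def pvABt : List Char → List Char × List Char
  | [] => ([], [])
  | c :: rest =>
    if c = '\\' then
      match rest with
      | [] => ([c], [])
      | d :: rest' => (c :: d :: (pvABt rest').1, (pvABt rest').2)
    else if c = '`' then ([c], rest)
    else (c :: (pvABt rest).1, (pvABt rest).2)

-- A's inner single-quote loop
def pvASq : List Char → List Char × List Char
  | [] => ([], [])
  | c :: rest =>
    if c = '\\' then
      match rest with
      | [] => ([c], [])
      | d :: rest' => (c :: d :: (pvASq rest').1, (pvASq rest').2)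
    else if c = '\'' then
      match rest with
      | d :: rest' =>
        if pvPrimeFollower d then
          ('\\' :: '\'' :: (pvASq (d :: rest')).1, (pvASq (d :: rest')).2)
        else ([c], rest)
      | [] => ([c], [])          -- next_ch = '' is not in the set: end of string
    else (c :: (pvASq rest).1, (pvASq rest).2)
termination_by l => l.length
decreasing_by all_goals simp_all

-- A's line-comment loop: copy until (not including) '\n'
def pvAComment : List Char → List Char × List Char
  | [] => ([], [])
  | c :: rest =>
    if c = '\n' then ([], c :: rest)
    else (c :: (pvAComment rest).1, (pvAComment rest).2)

theorem pvADq_len (l : List Char) : (pvADq l).2.length ≤ l.length := by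
  fun_induction pvADq l <;> simp_all <;> omega

theorem pvABt_len (l : List Char) : (pvABt l).2.length ≤ l.length := by
  fun_induction pvABt l <;> simp_all <;> omega

theorem pvASq_len (l : List Char) : (pvASq l).2.length ≤ l.length := by
  fun_induction pvASq l <;> simp_all <;> omega

theorem pvAComment_len (l : List Char) : (pvAComment l).2.length ≤ l.length := by
  fun_induction pvAComment l <;> simp_all <;> omega

-- A's outer while-loop.  In the comment branch the first '/' (≠ '\n') is peeled off
-- so that the recursion visibly decreases; it is the first appended comment char.
def pvAMain : List Char → List Char
  | [] => []
  | c :: rest =>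
    if c = '"' then c :: ((pvADq rest).1 ++ pvAMain (pvADq rest).2)
    else if c = '\'' then c :: ((pvASq rest).1 ++ pvAMain (pvASq rest).2)
    else if c = '`' then c :: ((pvABt rest).1 ++ pvAMain (pvABt rest).2)
    else if c = '/' && rest.head? = some '/' then
      c :: ((pvAComment rest).1 ++ pvAMain (pvAComment rest).2)
    else c :: pvAMain rest
termination_by l => l.length
decreasing_by
  all_goals simp
  all_goals first
    | (have := pvADq_len rest; omega)
    | (have := pvASq_len rest; omega)
    | (have := pvABt_len rest; omega)
    | (have := pvAComment_len rest; omega)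

def fix_primes_in_js (content : String) : String :=
  String.ofList (pvAMain content.toList)

-- ===== PORT B =====
inductive PvJsState
  | normal | dq | sq | tpl | comment
deriving DecidableEq, Repr

-- B's PRIME_FOLLOWERS string, as the character list it is scanned as
def pvBPrimeFollowers : List Char := [' ', '=', '+', '/', '*', '·', ',', '\t', '\n']

-- B's flat while-loop: one character per step, dispatching on (state, escaped)
def pvBLoop : PvJsState → Bool → List Char → List Char
  | _, _, [] => []
  | PvJsState.normal, _, c :: rest =>
    if c = '"' then c :: pvBLoop PvJsState.dq false rest
    else if c = '\'' then c :: pvBLoop PvJsState.sq false rest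
    else if c = '`' then c :: pvBLoop PvJsState.tpl false rest
    else if c = '/' && rest.head? = some '/' then c :: pvBLoop PvJsState.comment false rest
    else c :: pvBLoop PvJsState.normal false rest
  | PvJsState.comment, _, c :: rest =>
    if c = '\n' then c :: pvBLoop PvJsState.normal false rest
    else c :: pvBLoop PvJsState.comment false rest
  | PvJsState.sq, esc, c :: rest =>
    if esc then c :: pvBLoop PvJsState.sq false rest
    else if c = '\\' then c :: pvBLoop PvJsState.sq true rest
    else if c = '\'' then
      match rest.head? with
      | some d =>
        if pvBPrimeFollowers.contains d then '\\' :: '\'' :: pvBLoop PvJsState.sq false rest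
        else c :: pvBLoop PvJsState.normal false rest
      | none => c :: pvBLoop PvJsState.normal false rest
    else c :: pvBLoop PvJsState.sq false rest
  | PvJsState.dq, esc, c :: rest =>
    if esc then c :: pvBLoop PvJsState.dq false rest
    else if c = '\\' then c :: pvBLoop PvJsState.dq true rest
    else if c = '"' then c :: pvBLoop PvJsState.normal false rest
    else c :: pvBLoop PvJsState.dq false rest
  | PvJsState.tpl, esc, c :: rest =>
    if esc then c :: pvBLoop PvJsState.tpl false rest
    else if c = '\\' then c :: pvBLoop PvJsState.tpl true rest
    else if c = '`' then c :: pvBLoop PvJsState.normal false rest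
    else c :: pvBLoop PvJsState.tpl false rest

def fix_primes_in_js_alt (content : String) : String :=
  String.ofList (pvBLoop PvJsState.normal false content.toList)

-- ===== PRECONDITION & SPEC =====
def Spec_fix_primes_in_js (content : String) (out : String) : Prop := out = fix_primes_in_js_alt content
instance (content : String) (out : String) : Decidable (Spec_fix_primes_in_js content out) := by unfold Spec_fix_primes_in_js; infer_instance

-- ===== CLAIM (what is proved, stated in full; the proofs are below) =====
def Claim_equal_fix_primes_in_js : Prop := ∀ (content : String), Dom_fix_primes_in_js content → Spec_fix_primes_in_js content (fix_primes_in_js content)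

-- ===== LEMMAS AND PROOFS =====
-- one-step equations for A's inner loops, in the form the equivalence proof rewrites with
theorem pvADq_nil : pvADq [] = ([], []) := rfl
theorem pvADq_esc_nil : pvADq ['\\'] = (['\\'], []) := by rw [pvADq.eq_def]; simp
theorem pvADq_esc (d : Char) (l : List Char) :
    pvADq ('\\' :: d :: l) = ('\\' :: d :: (pvADq l).1, (pvADq l).2) := by
  rw [pvADq.eq_def]; simp
theorem pvADq_close (l : List Char) : pvADq ('"' :: l) = (['"'], l) := by
  rw [pvADq.eq_def]; simp
theorem pvADq_other (c : Char) (l : List Char) (hb : ¬c = '\\') (hq : ¬c = '"') :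
    pvADq (c :: l) = (c :: (pvADq l).1, (pvADq l).2) := by
  rw [pvADq.eq_def]; simp [hb, hq]
theorem pvABt_nil : pvABt [] = ([], []) := rfl
theorem pvABt_esc_nil : pvABt ['\\'] = (['\\'], []) := by rw [pvABt.eq_def]; simp
theorem pvABt_esc (d : Char) (l : List Char) :
    pvABt ('\\' :: d :: l) = ('\\' :: d :: (pvABt l).1, (pvABt l).2) := by
  rw [pvABt.eq_def]; simp
theorem pvABt_close (l : List Char) : pvABt ('`' :: l) = (['`'], l) := by
  rw [pvABt.eq_def]; simp
theorem pvABt_other (c : Char) (l : List Char) (hb : ¬c = '\\') (hq : ¬c = '`') :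
    pvABt (c :: l) = (c :: (pvABt l).1, (pvABt l).2) := by
  rw [pvABt.eq_def]; simp [hb, hq]
theorem pvASq_nil : pvASq [] = ([], []) := by rw [pvASq.eq_def]
theorem pvASq_esc_nil : pvASq ['\\'] = (['\\'], []) := by rw [pvASq.eq_def]; simp
theorem pvASq_esc (d : Char) (l : List Char) :
    pvASq ('\\' :: d :: l) = ('\\' :: d :: (pvASq l).1, (pvASq l).2) := by
  rw [pvASq.eq_def]; simp
theorem pvASq_q_nil : pvASq ['\''] = (['\''], []) := by rw [pvASq.eq_def]; simp
theorem pvASq_q_prime (d : Char) (l : List Char) (hp : pvPrimeFollower d = true) :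
    pvASq ('\'' :: d :: l) = ('\\' :: '\'' :: (pvASq (d :: l)).1, (pvASq (d :: l)).2) := by
  rw [pvASq.eq_def]; simp [hp]
theorem pvASq_q_end (d : Char) (l : List Char) (hp : ¬pvPrimeFollower d = true) :
    pvASq ('\'' :: d :: l) = (['\''], d :: l) := by
  rw [pvASq.eq_def]; simp [hp]
theorem pvASq_other (c : Char) (l : List Char) (hb : ¬c = '\\') (hq : ¬c = '\'') :
    pvASq (c :: l) = (c :: (pvASq l).1, (pvASq l).2) := by
  rw [pvASq.eq_def]; simp [hb, hq]
theorem pvAComment_nil : pvAComment [] = ([], []) := rfl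
theorem pvAComment_nl (l : List Char) : pvAComment ('\n' :: l) = ([], '\n' :: l) := by
  rw [pvAComment.eq_def]; simp
theorem pvAComment_other (c : Char) (l : List Char) (hn : ¬c = '\n') :
    pvAComment (c :: l) = (c :: (pvAComment l).1, (pvAComment l).2) := by
  rw [pvAComment.eq_def]; simp [hn]

-- the two prime-follower tests agree
theorem pvPrime_agree (d : Char) : pvBPrimeFollowers.contains d = pvPrimeFollower d := by
  simp only [pvBPrimeFollowers, pvPrimeFollower, List.contains_cons, List.contains_nil,
    Bool.or_false]
  simp [Bool.beq_eq_decide_eq, Bool.or_assoc]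

-- Combined invariant: each of A's loops, continued by A's outer loop, equals B's
-- machine started in the corresponding state.
def pvP (l : List Char) : Prop :=
  pvAMain l = pvBLoop PvJsState.normal false l ∧
  (pvADq l).1 ++ pvAMain (pvADq l).2 = pvBLoop PvJsState.dq false l ∧
  (pvASq l).1 ++ pvAMain (pvASq l).2 = pvBLoop PvJsState.sq false l ∧
  (pvABt l).1 ++ pvAMain (pvABt l).2 = pvBLoop PvJsState.tpl false l ∧
  (pvAComment l).1 ++ pvAMain (pvAComment l).2 = pvBLoop PvJsState.comment false l

theorem pvP_bounded : ∀ n l, l.length ≤ n → pvP l := by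
  intro n
  induction n with
  | zero =>
    intro l hl
    have : l = [] := List.eq_nil_of_length_eq_zero (Nat.le_zero.mp hl)
    subst this
    refine ⟨?_, ?_, ?_, ?_, ?_⟩ <;>
      simp [pvAMain, pvADq_nil, pvASq_nil, pvABt_nil, pvAComment_nil, pvBLoop]
  | succ n ih =>
    intro l hl
    match l with
    | [] =>
      refine ⟨?_, ?_, ?_, ?_, ?_⟩ <;>
        simp [pvAMain, pvADq_nil, pvASq_nil, pvABt_nil, pvAComment_nil, pvBLoop]
    | c :: rest =>
      have hr : rest.length ≤ n := by simpa using hl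
      obtain ⟨ihN, ihD, ihS, ihT, ihC⟩ := ih rest hr
      refine ⟨?_, ?_, ?_, ?_, ?_⟩
      · -- normal state
        by_cases h1 : c = '"'
        · subst h1; simp [pvAMain, pvBLoop, ihD]
        · by_cases h2 : c = '\''
          · subst h2; simp [pvAMain, pvBLoop, ihS]
          · by_cases h3 : c = '`'
            · subst h3; simp [pvAMain, pvBLoop, ihT]
            · by_cases h4 : c = '/' ∧ rest.head? = some '/'
              · obtain ⟨h4a, h4b⟩ := h4; subst h4a
                simp [pvAMain, pvBLoop, h4b, ihC]
              · have h4' : ¬(c = '/' ∧ rest.head? = some '/') := h4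
                simp [pvAMain, pvBLoop, h1, h2, h3, h4', ihN]
      · -- dq state
        by_cases hb : c = '\\'
        · subst hb
          cases rest with
          | nil => simp [pvADq_esc_nil, pvAMain, pvBLoop]
          | cons d rest' =>
            have hr2 : rest'.length ≤ n := by simp at hr; omega
            obtain ⟨_, ihD', _, _, _⟩ := ih rest' hr2
            simp [pvADq_esc, pvBLoop, ihD']
        · by_cases hq : c = '"'
          · subst hq; simp [pvADq_close, pvBLoop, ihN]
          · simp [pvADq_other c rest hb hq, pvBLoop, hb, hq, ihD]
      · -- sq state
        by_cases hb : c = '\\'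
        · subst hb
          cases rest with
          | nil => simp [pvASq_esc_nil, pvAMain, pvBLoop]
          | cons d rest' =>
            have hr2 : rest'.length ≤ n := by simp at hr; omega
            obtain ⟨_, _, ihS', _, _⟩ := ih rest' hr2
            simp [pvASq_esc, pvBLoop, ihS']
        · by_cases hq : c = '\''
          · subst hq
            cases rest with
            | nil => simp [pvASq_q_nil, pvAMain, pvBLoop]
            | cons d rest' =>
              by_cases hp : pvPrimeFollower d = true
              · have hm : d ∈ pvBPrimeFollowers := by
                  have h := pvPrime_agree d; rw [hp] at h; simpa using h
                simp [pvASq_q_prime d rest' hp, pvBLoop, hm, ihS]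
              · have hm : ¬d ∈ pvBPrimeFollowers := by
                  have h := pvPrime_agree d; simp [hp] at h; simpa using h
                simp [pvASq_q_end d rest' hp, pvBLoop, hm, ihN]
          · simp [pvASq_other c rest hb hq, pvBLoop, hb, hq, ihS]
      · -- tpl state
        by_cases hb : c = '\\'
        · subst hb
          cases rest with
          | nil => simp [pvABt_esc_nil, pvAMain, pvBLoop]
          | cons d rest' =>
            have hr2 : rest'.length ≤ n := by simp at hr; omega
            obtain ⟨_, _, _, ihT', _⟩ := ih rest' hr2
            simp [pvABt_esc, pvBLoop, ihT']
        · by_cases hq : c = '`'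
          · subst hq; simp [pvABt_close, pvBLoop, ihN]
          · simp [pvABt_other c rest hb hq, pvBLoop, hb, hq, ihT]
      · -- comment state
        by_cases hn : c = '\n'
        · subst hn; simp [pvAComment_nl, pvAMain, pvBLoop, ihN]
        · simp [pvAComment_other c rest hn, pvBLoop, hn, ihC]

theorem pvP_all (l : List Char) : pvP l := pvP_bounded l.length l le_rfl

-- ===== VERDICT (by name: the statement is the Claim_ definition above) =====
theorem fix_primes_in_js_spec : Claim_equal_fix_primes_in_js := by
  intro content _
  unfold Spec_fix_primes_in_js fix_primes_in_js fix_primes_in_js_alt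
  exact congrArg String.ofList (pvP_all content.toList).1
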